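-- pv_equiv track=rewrite | github.com/XuHuaXH/Google_Hash_Code_2021_Practice | minimal_solver.py | minimal_solver
-- ===== SOURCE A (Python) =====
-- def minimal_solver(m, n2, n3, n4, pizza_data):
--     deliveries = []
--     while n2 > 0:
--         if m >= 2:
--             delivery = [m - 1, m - 2]
--             deliveries.append(delivery)
--             m -= 2
--         else:
--             break
--         n2 -= 1
--     while n3 > 0:
--         if m >= 3:
--             delivery = [m - 1, m - 2, m - 3]
--             deliveries.append(delivery)
--             m -= 3
--         else:
--             break
--         n3 -= 1
--     while n4 > 0:
--         if m >= 4: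
--             delivery = [m - 1, m - 2, m - 3, m - 4]
--             deliveries.append(delivery)
--             m -= 4
--         else:
--             break
--         n4 -= 1
--     return deliveries
-- ===== SOURCE B (Python) =====
-- def minimal_solver(m, n2, n3, n4, pizza_data):
--     # Phase 1: closed-form delivery counts per team size (no delivery loop).
--     k2 = min(n2, m // 2) if n2 > 0 and m >= 2 else 0
--     r2 = m - 2 * k2
--     k3 = min(n3, r2 // 3) if n3 > 0 and r2 >= 3 else 0
--     r3 = r2 - 3 * k3
--     k4 = min(n4, r3 // 4) if n4 > 0 and r3 >= 4 else 0
--     # Phase 2: one flat descending index stream, chunked by the size multiset.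
--     sizes = [2] * k2 + [3] * k3 + [4] * k4
--     total = 2 * k2 + 3 * k3 + 4 * k4
--     stream = [m - 1 - i for i in range(total)]
--     out, pos = [], 0
--     for s in sizes:
--         out.append(stream[pos:pos + s])
--         pos += s
--     return out
-- ===== Notes on version B (the rewrite author's own statement) =====
-- stated objective: alternative
-- what changed: Replaces A's three break-driven greedy while-loops by a two-phase plan: the per-size delivery counts k2,k3,k4 are computed in closed form (min(count, remaining // size)), then a single flat descending index stream [m-1, m-2, ...] is built once and chunked into deliveries by the size multiset [2]*k2+[3]*k3+[4]*k4; it trades A's stateful simulation for arithmetic counts plus stream slicing at the same cost.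
import Mathlib
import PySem

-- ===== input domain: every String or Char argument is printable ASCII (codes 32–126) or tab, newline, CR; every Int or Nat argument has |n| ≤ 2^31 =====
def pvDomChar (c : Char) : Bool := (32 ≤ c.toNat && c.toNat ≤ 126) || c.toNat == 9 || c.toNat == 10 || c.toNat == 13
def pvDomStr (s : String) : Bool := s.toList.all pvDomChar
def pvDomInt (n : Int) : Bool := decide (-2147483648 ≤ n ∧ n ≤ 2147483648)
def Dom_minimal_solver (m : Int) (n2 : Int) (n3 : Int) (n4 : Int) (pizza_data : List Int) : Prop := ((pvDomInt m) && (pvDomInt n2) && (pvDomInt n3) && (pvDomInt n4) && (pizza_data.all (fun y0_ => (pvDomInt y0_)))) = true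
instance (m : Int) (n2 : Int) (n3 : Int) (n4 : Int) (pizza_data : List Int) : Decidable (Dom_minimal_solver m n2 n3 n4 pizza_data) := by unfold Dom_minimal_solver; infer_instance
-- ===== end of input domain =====

-- B replaces A's three break-driven greedy while-loops by two phases: closed-form per-size
-- delivery counts, then one flat descending index stream chunked by the size multiset (objective: alternative decomposition, same cost).

-- ===== PORT A =====
-- the first while-loop of A: teams of 2
def pvLoop2 (m : Int) (n2 : Int) (acc : List (List Int)) : List (List Int) × Int :=
  if n2 > 0 then
    if m ≥ 2 then pvLoop2 (m - 2) (n2 - 1) (acc ++ [[m - 1, m - 2]]) else (acc, m)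
  else (acc, m)
termination_by n2.toNat
decreasing_by omega

-- the second while-loop of A: teams of 3
def pvLoop3 (m : Int) (n3 : Int) (acc : List (List Int)) : List (List Int) × Int :=
  if n3 > 0 then
    if m ≥ 3 then pvLoop3 (m - 3) (n3 - 1) (acc ++ [[m - 1, m - 2, m - 3]]) else (acc, m)
  else (acc, m)
termination_by n3.toNat
decreasing_by omega

-- the third while-loop of A: teams of 4
def pvLoop4 (m : Int) (n4 : Int) (acc : List (List Int)) : List (List Int) × Int :=
  if n4 > 0 then
    if m ≥ 4 then pvLoop4 (m - 4) (n4 - 1) (acc ++ [[m - 1, m - 2, m - 3, m - 4]]) else (acc, m)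
  else (acc, m)
termination_by n4.toNat
decreasing_by omega

def minimal_solver (m : Int) (n2 : Int) (n3 : Int) (n4 : Int) (pizza_data : List Int) : List (List Int) :=
  let r2 := pvLoop2 m n2 []
  let r3 := pvLoop3 r2.2 n3 r2.1
  let r4 := pvLoop4 r3.2 n4 r3.1
  r4.1

-- ===== PORT B =====
def minimal_solver_alt (m : Int) (n2 : Int) (n3 : Int) (n4 : Int) (pizza_data : List Int) : List (List Int) :=
  -- Phase 1: closed-form delivery counts per team size
  let k2 := if n2 > 0 ∧ m ≥ 2 then min n2 (PySem.Int.floordiv m 2) else 0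
  let r2 := m - 2 * k2
  let k3 := if n3 > 0 ∧ r2 ≥ 3 then min n3 (PySem.Int.floordiv r2 3) else 0
  let r3 := r2 - 3 * k3
  let k4 := if n4 > 0 ∧ r3 ≥ 4 then min n4 (PySem.Int.floordiv r3 4) else 0
  -- Phase 2: one flat descending index stream, chunked by the size multiset
  let sizes : List Int := List.replicate k2.toNat 2 ++ List.replicate k3.toNat 3 ++ List.replicate k4.toNat 4
  let total := 2 * k2 + 3 * k3 + 4 * k4
  let stream := (PySem.List.pyRange 0 total 1).map (fun i => m - 1 - i)
  (sizes.foldl (fun (st : List (List Int) × Int) s =>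
      (st.1 ++ [PySem.List.slice stream (some st.2) (some (st.2 + s))], st.2 + s)) ([], 0)).1

-- ===== PRECONDITION & SPEC =====
def Spec_minimal_solver (m : Int) (n2 : Int) (n3 : Int) (n4 : Int) (pizza_data : List Int) (out : List (List Int)) : Prop := out = minimal_solver_alt m n2 n3 n4 pizza_data
instance (m : Int) (n2 : Int) (n3 : Int) (n4 : Int) (pizza_data : List Int) (out : List (List Int)) : Decidable (Spec_minimal_solver m n2 n3 n4 pizza_data out) := by unfold Spec_minimal_solver; infer_instance

-- ===== CLAIM (what is proved, stated in full; the proofs are below) =====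
def Claim_equal_minimal_solver : Prop := ∀ (m : Int) (n2 : Int) (n3 : Int) (n4 : Int) (pizza_data : List Int), Dom_minimal_solver m n2 n3 n4 pizza_data → Spec_minimal_solver m n2 n3 n4 pizza_data (minimal_solver m n2 n3 n4 pizza_data)

-- ===== LEMMAS AND PROOFS =====

-- the number of deliveries a group (count n, size s) makes
def pvK (m n s : Int) : Int := max 0 (min n (PySem.Int.floordiv m s))

-- the i-th delivery of a group of size s starting from m pizzas
def pvRow (m s i : Int) : List Int :=
  (PySem.List.pyRange 0 s 1).map (fun j => m - 1 - s * i - j)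

-- the k deliveries of one group
def pvGroup (m k s : Int) : List (List Int) :=
  (PySem.List.pyRange 0 k 1).map (fun i => pvRow m s i)

lemma pvGroup_zero (m s : Int) : pvGroup m 0 s = [] := by
  simp [pvGroup, PySem.List.pyRange_one_eq_nil (le_refl 0)]

lemma pvRow_shift (m s i : Int) : pvRow m s (i + 1) = pvRow (m - s) s i := by
  unfold pvRow
  apply List.map_congr_left
  intro j _
  ring

lemma pvGroup_cons (m k s : Int) (hk : 1 ≤ k) :
    pvGroup m k s = pvRow m s 0 :: pvGroup (m - s) (k - 1) s := by
  unfold pvGroup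
  rw [PySem.List.pyRange_one 0 k, PySem.List.pyRange_one 0 (k - 1)]
  rw [show (k - 0).toNat = (k - 1 - 0).toNat + 1 by omega, List.range_succ_eq_map]
  simp only [List.map_cons, List.map_map]
  congr 1
  apply List.map_congr_left
  intro a _
  simp only [Function.comp_apply]
  rw [show ((0:Int) + (a.succ : Int)) = (a:Int) + 1 by push_cast; ring,
      show (0:Int) + (a:Int) = (a:Int) by ring]
  exact pvRow_shift m s a

lemma floordiv_sub_self (m s : Int) (hs : 0 < s) :
    PySem.Int.floordiv (m - s) s = PySem.Int.floordiv m s - 1 := by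
  have h := PySem.Int.floordiv_mul_add_mod m s
  have h0 := PySem.Int.mod_nonneg m hs
  have h1 := PySem.Int.mod_lt m hs
  rw [PySem.Int.floordiv_eq_iff_of_pos hs]
  constructor <;> nlinarith

lemma floordiv_pos (m s : Int) (hs : 0 < s) (hm : s ≤ m) : 1 ≤ PySem.Int.floordiv m s := by
  exact (PySem.Int.le_floordiv_iff_mul_le (a := m) (b := s) (q := 1) hs).mpr (by omega)

lemma floordiv_nonpos (m s : Int) (hs : 0 < s) (hm : m < s) : PySem.Int.floordiv m s ≤ 0 := by
  have := (PySem.Int.floordiv_lt_iff_lt_mul (a := m) (b := s) (q := 1) hs).mpr (by omega)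
  omega

-- B's if-guarded count equals pvK
lemma pvK_eq_if (m n s : Int) (hs : 0 < s) :
    (if n > 0 ∧ m ≥ s then min n (PySem.Int.floordiv m s) else 0) = pvK m n s := by
  unfold pvK
  split
  · next h =>
    have := floordiv_pos m s hs h.2
    omega
  · next h =>
    by_cases hn : n > 0
    · have hm : m < s := by omega
      have := floordiv_nonpos m s hs hm
      omega
    · omega

lemma pvK_nonneg (m n s : Int) : 0 ≤ pvK m n s := le_max_left 0 _

-- generic form of A's loop body for group size s
def pvLoopG (s : Int) (m n : Int) (acc : List (List Int)) : List (List Int) × Int :=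
  if n > 0 then
    if m ≥ s then pvLoopG s (m - s) (n - 1) (acc ++ [pvRow m s 0]) else (acc, m)
  else (acc, m)
termination_by n.toNat
decreasing_by omega

lemma pvLoopG_eq (fuel : Nat) : ∀ (s m n : Int) (acc : List (List Int)), 0 < s → n.toNat ≤ fuel →
    pvLoopG s m n acc = (acc ++ pvGroup m (pvK m n s) s, m - s * pvK m n s) := by
  induction fuel with
  | zero =>
    intro s m n acc hs hf
    rw [pvLoopG]
    have hn : ¬ n > 0 := by omega
    have hk : pvK m n s = 0 := by
      unfold pvK; omega
    simp [hn, hk, pvGroup_zero]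
  | succ f ih =>
    intro s m n acc hs hf
    rw [pvLoopG]
    by_cases hn : n > 0
    · by_cases hm : m ≥ s
      · have hd := floordiv_pos m s hs hm
        have hd2 := floordiv_sub_self m s hs
        have hk1 : 1 ≤ pvK m n s := by unfold pvK; omega
        have hk' : pvK (m - s) (n - 1) s = pvK m n s - 1 := by
          unfold pvK; rw [hd2]; omega
        rw [if_pos hn, if_pos hm, ih s (m - s) (n - 1) (acc ++ [pvRow m s 0]) hs (by omega)]
        rw [hk', pvGroup_cons m (pvK m n s) s hk1]
        rw [Prod.mk.injEq]
        exact ⟨by simp, by ring⟩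
      · have hd := floordiv_nonpos m s hs (by omega)
        have hk : pvK m n s = 0 := by unfold pvK; omega
        simp [hn, hm, hk, pvGroup_zero]
    · have hk : pvK m n s = 0 := by unfold pvK; omega
      simp [hn, hk, pvGroup_zero]

lemma pvLoop2_eq_G (m n : Int) (acc : List (List Int)) : pvLoop2 m n acc = pvLoopG 2 m n acc := by
  rw [pvLoop2, pvLoopG]
  split
  · split
    · rw [pvLoop2_eq_G]
      congr 2
      simp [pvRow, show PySem.List.pyRange 0 2 1 = [0, 1] from by decide]
      omega
    · rfl
  · rfl
termination_by n.toNat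
decreasing_by omega

lemma pvLoop3_eq_G (m n : Int) (acc : List (List Int)) : pvLoop3 m n acc = pvLoopG 3 m n acc := by
  rw [pvLoop3, pvLoopG]
  split
  · split
    · rw [pvLoop3_eq_G]
      congr 2
      simp [pvRow, show PySem.List.pyRange 0 3 1 = [0, 1, 2] from by decide]
      omega
    · rfl
  · rfl
termination_by n.toNat
decreasing_by omega

lemma pvLoop4_eq_G (m n : Int) (acc : List (List Int)) : pvLoop4 m n acc = pvLoopG 4 m n acc := by
  rw [pvLoop4, pvLoopG]
  split
  · split
    · rw [pvLoop4_eq_G]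
      congr 2
      simp [pvRow, show PySem.List.pyRange 0 4 1 = [0, 1, 2, 3] from by decide]
      omega
    · rfl
  · rfl
termination_by n.toNat
decreasing_by omega

-- a slice of the descending stream is one delivery row
lemma slice_stream (m T p s : Int) (hp : 0 ≤ p) (hs : 0 ≤ s) (hT : p + s ≤ T) :
    PySem.List.slice ((PySem.List.pyRange 0 T 1).map (fun i => m - 1 - i)) (some p) (some (p + s))
      = (PySem.List.pyRange 0 s 1).map (fun j => m - 1 - p - j) := by
  rw [PySem.List.slice_toNat _ hp (by omega), PySem.List.pyRange_one 0 T, PySem.List.pyRange_one 0 s]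
  rw [List.map_map, List.map_map]
  apply List.ext_getElem
  · simp; omega
  · intro i h1 h2
    simp only [List.getElem_take, List.getElem_drop, List.getElem_map, List.getElem_range,
      Function.comp_apply]
    have hpi : ((p : Int)) = (p.toNat : Int) := by omega
    push_cast
    omega

-- chunking the stream along 'replicate k s' emits exactly the k rows of one group
lemma fold_chunks (m T : Int) (k : Nat) : ∀ (s p : Int) (acc : List (List Int)) (rest : List Int),
    0 < s → 0 ≤ p → p + s * k ≤ T →
    ((List.replicate k s ++ rest).foldl
      (fun (st : List (List Int) × Int) s' =>
        (st.1 ++ [PySem.List.slice ((PySem.List.pyRange 0 T 1).map (fun i => m - 1 - i)) (some st.2) (some (st.2 + s'))], st.2 + s'))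
      (acc, p))
    = (rest.foldl
      (fun (st : List (List Int) × Int) s' =>
        (st.1 ++ [PySem.List.slice ((PySem.List.pyRange 0 T 1).map (fun i => m - 1 - i)) (some st.2) (some (st.2 + s'))], st.2 + s'))
      (acc ++ pvGroup (m - p) k s, p + s * k)) := by
  induction k with
  | zero =>
    intro s p acc rest hs hp hT
    simp [pvGroup_zero]
  | succ k ih =>
    intro s p acc rest hs hp hT
    rw [List.replicate_succ, List.cons_append, List.foldl_cons]
    rw [ih s (p + s) (acc ++ [PySem.List.slice ((PySem.List.pyRange 0 T 1).map (fun i => m - 1 - i)) (some p) (some (p + s))]) rest hs (by omega) (by push_cast at hT ⊢; nlinarith)]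
    have hrow : PySem.List.slice ((PySem.List.pyRange 0 T 1).map (fun i => m - 1 - i)) (some p) (some (p + s))
        = pvRow (m - p) s 0 := by
      rw [slice_stream m T p s hp (by omega) (by push_cast at hT; nlinarith)]
      unfold pvRow
      apply List.map_congr_left
      intro j _
      ring
    have hgrp : pvGroup (m - p) (k + 1 : Nat) s = pvRow (m - p) s 0 :: pvGroup (m - p - s) k s := by
      rw [show ((k + 1 : Nat) : Int) = (k : Int) + 1 by push_cast; ring]
      rw [pvGroup_cons (m - p) ((k : Int) + 1) s (by omega)]
      simp
    rw [hrow, hgrp]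
    congr 1
    simp only [Prod.mk.injEq]
    constructor
    · simp [show m - (p + s) = m - p - s by ring]
    · push_cast; ring

-- ===== VERDICT (by name: the statement is the Claim_ definition above) =====
theorem minimal_solver_spec : Claim_equal_minimal_solver := by
  intro m n2 n3 n4 pizza_data _
  unfold Spec_minimal_solver minimal_solver minimal_solver_alt
  simp only
  rw [pvLoop2_eq_G, pvLoopG_eq n2.toNat 2 m n2 [] (by omega) (le_refl _)]
  rw [pvLoop3_eq_G, pvLoopG_eq n3.toNat 3 _ n3 _ (by omega) (le_refl _)]
  rw [pvLoop4_eq_G, pvLoopG_eq n4.toNat 4 _ n4 _ (by omega) (le_refl _)]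
  simp only
  rw [pvK_eq_if m n2 2 (by omega)]
  set K2 := pvK m n2 2 with hK2
  rw [pvK_eq_if (m - 2 * K2) n3 3 (by omega)]
  set K3 := pvK (m - 2 * K2) n3 3 with hK3
  rw [pvK_eq_if (m - 2 * K2 - 3 * K3) n4 4 (by omega)]
  set K4 := pvK (m - 2 * K2 - 3 * K3) n4 4 with hK4
  have h2 : 0 ≤ K2 := by rw [hK2]; exact pvK_nonneg m n2 2
  have h3 : 0 ≤ K3 := by rw [hK3]; exact pvK_nonneg _ n3 3
  have h4 : 0 ≤ K4 := by rw [hK4]; exact pvK_nonneg _ n4 4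
  set T := 2 * K2 + 3 * K3 + 4 * K4 with hT
  have hsz : List.replicate K2.toNat (2:Int) ++ List.replicate K3.toNat 3 ++ List.replicate K4.toNat 4
      = List.replicate K2.toNat (2:Int) ++ (List.replicate K3.toNat 3 ++ (List.replicate K4.toNat 4 ++ [])) := by
    simp [List.append_assoc]
  rw [hsz]
  rw [fold_chunks m T K2.toNat]
  rw [fold_chunks m T K3.toNat]
  rw [fold_chunks m T K4.toNat]
  simp only [List.foldl_nil, List.nil_append]
  have c2 : ((K2.toNat : Int)) = K2 := by omega
  have c3 : ((K3.toNat : Int)) = K3 := by omega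
  have c4 : ((K4.toNat : Int)) = K4 := by omega
  rw [c2, c3, c4]
  rw [show m - (0:Int) = m by ring, show m - (0 + 2 * K2) = m - 2 * K2 by ring,
      show m - (0 + 2 * K2 + 3 * K3) = m - 2 * K2 - 3 * K3 by ring]
  simp
  all_goals omega
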